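-- pv_equiv track=rewrite | github.com/Lyle-Kottke/520-Exercise-2 | problem2/solutions/solution1.py | solve
-- ===== SOURCE A (Python) =====
-- def solve(n: int, k: int) -> tuple[int, int]:
--     """
--     Calculates the irreducible fraction A/B for the probability of at least two out of k
--     people sharing a birthday in a year with 2^n days, and returns A mod (10^6+3) and B mod (10^6+3).
--
--     :param n: Exponent such that 2^n is the number of days in a year.
--     :param k: Number of people interviewed.
--     :return: A and B modulo 10^6 + 3.
--     """
--     M = 1000003  # Modulo 10^6 + 3
--     M_P = M - 1  # Modulo for exponent in Fermat's Little Theorem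
--
--     # 1. Edge Case: k > 2^n (Guaranteed shared birthday)
--     # Since k <= 10^18, we only need to check for n <= 60.
--     # If n is large (e.g., n=10^18), 2^n is much larger than k, so k <= 2^n.
--     if n < 60 and k > (1 << n):
--         return 1, 1
--
--     # 2. Calculate V = v_2((k-1)!) using Legendre's formula: V = sum(floor((k-1)/2^j))
--     def v2_factorial(x):
--         if x < 0: return 0
--         v = 0
--         power_of_2 = 2
--         while power_of_2 <= x:
--             v += x // power_of_2
--             # Check for overflow before multiplication if not using Python's arbitrary precision
--             # Here, we can rely on Python's large integers for intermediate steps, but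
--             # we will only need the final result modulo M_P.
--             if x // power_of_2 == 0: break # Safety break, though the condition above covers it
--             if power_of_2 > x // 2: # Check to avoid overflow in power_of_2 * 2 if k was smaller
--                 break
--             power_of_2 *= 2
--         return v
--
--     V = v2_factorial(k - 1)
--
--     # 3. Calculate P2 = n + V
--     P2_mod_M_P = (n % M_P + V % M_P) % M_P
--
--     # 4. Calculate B mod M: B = 2^(n(k-1) - V)
--     # Exponent E = n(k-1) - V
--     n_mod_M_P = n % M_P
--     k_minus_1_mod_M_P = (k - 1) % M_P
--     V_mod_M_P = V % M_P
--
--     # E mod M_P = ( (n mod M_P) * ((k-1) mod M_P) - (V mod M_P) ) mod M_P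
--     # Ensure intermediate product is also modulo M_P to prevent overflow if M_P was smaller
--     E_mod_M_P = (n_mod_M_P * k_minus_1_mod_M_P) % M_P
--     E_mod_M_P = (E_mod_M_P - V_mod_M_P + M_P) % M_P
--
--     B = pow(2, E_mod_M_P, M)
--
--     # 5. Calculate A mod M:
--     # A = (2^(nk) - product(2^n - i for i=0..k-1)) / 2^P2
--
--     # Modular inverse of 2^P2: I = (2^P2)^(-1) mod M = 2^(M - 2 - P2 mod M_P) mod M
--     # The exponent for the inverse is M - 2 - (P2 mod M_P).
--     # Since we need to compute pow(2, P2, M)^(-1), it's pow(pow(2, P2_mod_M_P, M), M-2, M).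
--     # Easier: pow(2, M - 2 - P2_mod_M_P, M)
--     inverse_exp = (M_P - P2_mod_M_P) % M_P # M-1 - (P2 mod M-1)
--     I = pow(2, inverse_exp, M)
--
--     # Calculate A_comp mod M
--     A_comp = 0 # Default for k >= M case
--
--     # Case k < M: Compute A_comp = product(2^n - i) mod M
--     if k < M:
--         D_m = pow(2, n % M_P, M) # 2^n mod M
--         A_comp = 1
--         for i in range(k):
--             term = (D_m - i) % M
--             A_comp = (A_comp * term) % M
--
--     # Case k >= M: A_comp must be 0 mod M because 2^n - i will be 0 mod M for some i < k
--     # since D_m will hit D_m mod M = i for some i in {0, ..., M-1}.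
--     # The term 'i' in the product will reach D_m mod M.
--     # e.g., i = D_m. term = D_m - D_m = 0. Product is 0.
--
--     # Calculate B_total mod M
--     # B_total = 2^(nk)
--     nk_mod_M_P = ((n % M_P) * (k % M_P)) % M_P
--     B_total = pow(2, nk_mod_M_P, M)
--
--     # Calculate A' = B_total - A_comp mod M
--     A_prime = (B_total - A_comp + M) % M
--
--     # Calculate A = A' * I mod M
--     A = (A_prime * I) % M
--
--     return A, B
-- ===== SOURCE B (Python) =====
-- def solve(n: int, k: int) -> tuple[int, int]:
--     M = 1000003
--     MP = M - 1
--     # guaranteed collision when k exceeds the number of days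
--     if n < 60 and k > (1 << n):
--         return 1, 1
--     # v_2((k-1)!) by the closed form x - popcount(x) instead of Legendre's summation loop
--     x = k - 1
--     V = 0 if x < 0 else x - x.bit_count()
--     P2 = (n % MP + V % MP) % MP
--     E = ((n % MP) * ((k - 1) % MP) - V % MP) % MP
--     B = pow(2, E, M)
--     I = pow(2, (MP - P2) % MP, M)
--     A_comp = 0
--     if k < M:
--         D = pow(2, n % MP, M)
--         if D < k:
--             A_comp = 0  # the factor 2^n - D hits 0 mod M inside the product
--         else:
--             A_comp = 1
--             for i in range(k):
--                 A_comp = A_comp * (D - i) % M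
--     B_total = pow(2, ((n % MP) * (k % MP)) % MP, M)
--     A = (B_total - A_comp + M) % M * I % M
--     return A, B
-- ===== Notes on version B (the rewrite author's own statement) =====
-- stated objective: faster
-- what changed: B replaces the Legendre-formula while-loop for v2((k-1)!) with the closed form x - popcount(x), and short-circuits the k-term falling-factorial product to 0 as soon as the residue 2^n mod p is below k (a zero factor is then guaranteed), so the product loop runs only when it has at most 2^n mod p <= 10^6 nonzero factors.
import Mathlib
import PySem

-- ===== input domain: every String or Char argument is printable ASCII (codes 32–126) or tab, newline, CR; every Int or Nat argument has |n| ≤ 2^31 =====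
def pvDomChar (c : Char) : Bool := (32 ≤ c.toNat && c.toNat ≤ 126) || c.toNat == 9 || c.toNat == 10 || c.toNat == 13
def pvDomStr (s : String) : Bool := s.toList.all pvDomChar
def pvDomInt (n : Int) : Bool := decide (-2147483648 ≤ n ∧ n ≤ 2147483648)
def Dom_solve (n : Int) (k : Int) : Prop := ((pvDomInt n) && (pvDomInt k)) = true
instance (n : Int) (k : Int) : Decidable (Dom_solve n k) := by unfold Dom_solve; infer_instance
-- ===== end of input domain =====

-- B replaces A's Legendre-summation while-loop by the closed form v2((k-1)!) = x - popcount(x)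
-- and short-circuits the falling-factorial product to 0 when a zero factor is guaranteed (faster for large k).

-- ===== PORT A =====
-- while-loop of A's v2_factorial; x, v, power_of_2 are Nat because the loop is only entered
-- with x = k-1 ≥ 0 (the x < 0 case returns first) and power_of_2 = 2, 4, 8, …; on these
-- nonnegative values Nat division coincides with Python's //.  The first argument is fuel
-- (a totality guard only: x+1 doublings always suffice, see pvV2Factorial_eq).
def pvV2Loop : Nat → Nat → Nat → Nat → Nat
  | 0, _x, v, _p => v
  | fuel + 1, x, v, p =>
    if p ≤ x then
      let v' := v + x / p
      if x / p = 0 then v'          -- safety break of A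
      else if x / 2 < p then v'     -- 'power_of_2 > x // 2' break of A
      else pvV2Loop fuel x v' (2 * p)
    else v

-- A's inner helper v2_factorial
def pvV2Factorial (x : Int) : Int :=
  if x < 0 then 0 else (pvV2Loop (x.toNat + 1) x.toNat 0 2 : Int)

def solve (n : Int) (k : Int) : Int × Int :=
  let M : Int := 1000003
  let MP : Int := M - 1
  -- '1 << n' raises ValueError in Python when n < 0; Pre_solve excludes n < 0, so n.toNat is exact here
  if n < 60 ∧ (1 : Int) <<< n.toNat < k then (1, 1)
  else
    let V := pvV2Factorial (k - 1)
    let P2 := PySem.Int.mod (PySem.Int.mod n MP + PySem.Int.mod V MP) MP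
    let nMP := PySem.Int.mod n MP
    let km1MP := PySem.Int.mod (k - 1) MP
    let VMP := PySem.Int.mod V MP
    let E1 := PySem.Int.mod (nMP * km1MP) MP
    let E := PySem.Int.mod (E1 - VMP + MP) MP
    let B := PySem.Int.powMod 2 E.toNat M
    let invExp := PySem.Int.mod (MP - P2) MP
    let I := PySem.Int.powMod 2 invExp.toNat M
    let Acomp : Int :=
      if k < M then
        let Dm := PySem.Int.powMod 2 (PySem.Int.mod n MP).toNat M
        (PySem.List.pyRange 0 k 1).foldl
          (fun acc i => PySem.Int.mod (acc * PySem.Int.mod (Dm - i) M) M) 1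
      else 0
    let nkMP := PySem.Int.mod (PySem.Int.mod n MP * PySem.Int.mod k MP) MP
    let Btot := PySem.Int.powMod 2 nkMP.toNat M
    let Aprime := PySem.Int.mod (Btot - Acomp + M) M
    let A := PySem.Int.mod (Aprime * I) M
    (A, B)

-- ===== PORT B =====
-- x.bit_count() of Source B is PySem.Int.bitCount
def solve_alt (n : Int) (k : Int) : Int × Int :=
  let M : Int := 1000003
  let MP : Int := M - 1
  if n < 60 ∧ (1 : Int) <<< n.toNat < k then (1, 1)
  else
    let x := k - 1
    let V : Int := if x < 0 then 0 else x - (PySem.Int.bitCount x : Int)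
    let P2 := PySem.Int.mod (PySem.Int.mod n MP + PySem.Int.mod V MP) MP
    let E := PySem.Int.mod (PySem.Int.mod n MP * PySem.Int.mod (k - 1) MP - PySem.Int.mod V MP) MP
    let B := PySem.Int.powMod 2 E.toNat M
    let I := PySem.Int.powMod 2 (PySem.Int.mod (MP - P2) MP).toNat M
    let Acomp : Int :=
      if k < M then
        let D := PySem.Int.powMod 2 (PySem.Int.mod n MP).toNat M
        if D < k then 0
        else (PySem.List.pyRange 0 k 1).foldl
          (fun acc i => PySem.Int.mod (acc * (D - i)) M) 1
      else 0
    let Btot := PySem.Int.powMod 2 (PySem.Int.mod (PySem.Int.mod n MP * PySem.Int.mod k MP) MP).toNat M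
    let A := PySem.Int.mod (PySem.Int.mod (Btot - Acomp + M) M * I) M
    (A, B)

-- ===== PRECONDITION & SPEC =====
-- Pre_ excludes n < 0, on which Python's '1 << n' raises ValueError (negative shift count).
def Pre_solve (n : Int) (k : Int) : Prop := 0 ≤ n
instance (n : Int) (k : Int) : Decidable (Pre_solve n k) := by unfold Pre_solve; infer_instance
def pvWitness_solve : Int × Int := (3, 5)

def Spec_solve (n : Int) (k : Int) (out : Int × Int) : Prop := out = solve_alt n k
instance (n : Int) (k : Int) (out : Int × Int) : Decidable (Spec_solve n k out) := by unfold Spec_solve; infer_instance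

-- ===== CLAIM (what is proved, stated in full; the proofs are below) =====
def Claim_equal_solve : Prop := ∀ (n : Int) (k : Int), Dom_solve n k → Pre_solve n k → Spec_solve n k (solve n k)

-- ===== LEMMAS AND PROOFS =====

theorem pvBitCount_le (m : Nat) : PySem.Int.bitCount (m : Int) ≤ m := by
  induction m using Nat.strong_induction_on with
  | _ m ih =>
    match m with
    | 0 => simp
    | n + 1 =>
      have h := ih ((n + 1) / 2) (by omega)
      rw [PySem.Int.bitCount_natCast (show 0 < n + 1 by omega)]
      omega

-- A's while-loop computes Σ_{j≥0} x / (p·2^j) = 2·(x/p) − popcount(x/p) (fuel permitting)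
theorem pvV2Loop_eq (fuel : Nat) : ∀ x v p, 1 ≤ p → x < p * 2 ^ fuel →
    pvV2Loop fuel x v p = v + (2 * (x / p) - PySem.Int.bitCount ((x / p : Nat) : Int)) := by
  induction fuel with
  | zero =>
    intro x v p hp hf
    have h0 : x / p = 0 := Nat.div_eq_of_lt (by simpa using hf)
    simp [pvV2Loop, h0]
  | succ fuel ih =>
    intro x v p hp hf
    by_cases h1 : p ≤ x
    · by_cases h2 : x / p = 0
      · -- the safety break; both sides are v
        simp [pvV2Loop, h1, h2]
      · by_cases h3 : x / 2 < p
        · -- break: power_of_2 > x // 2, so x / p = 1 here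
          have hdd : x / p / 2 = 0 := by
            rw [Nat.div_div_eq_div_mul, Nat.mul_comm, ← Nat.div_div_eq_div_mul]
            exact Nat.div_eq_of_lt h3
          have hone : x / p = 1 := by omega
          simp [pvV2Loop, h1, h3, hone]
          decide
        · -- the loop step: p doubles
          simp only [pvV2Loop, if_pos h1, if_neg h2, if_neg h3]
          have hf' : x < 2 * p * 2 ^ fuel := by
            have hr : p * 2 ^ (fuel + 1) = 2 * p * 2 ^ fuel := by ring
            omega
          rw [ih x _ (2 * p) (by omega) hf']
          have hdd : x / (2 * p) = x / p / 2 := by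
            rw [Nat.div_div_eq_div_mul, Nat.mul_comm]
          have hp2 : 0 < x / p := Nat.pos_of_ne_zero h2
          have hpe := PySem.Int.bitCount_natCast hp2
          have hle := pvBitCount_le (x / p / 2)
          rw [hdd, hpe]
          omega
    · -- p > x : loop never entered
      have h0 : x / p = 0 := Nat.div_eq_of_lt (by omega)
      simp [pvV2Loop, h1, h0]

-- the Legendre sum equals x − popcount(x)
theorem pvV2Factorial_eq (x : Int) :
    pvV2Factorial x = if x < 0 then 0 else x - (PySem.Int.bitCount x : Int) := by
  unfold pvV2Factorial
  by_cases hx : x < 0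
  · simp [hx]
  · simp only [if_neg hx]
    set q := x.toNat with hq
    have hx' : x = (q : Int) := by omega
    have hfuel : q < 2 * 2 ^ (q + 1) :=
      lt_of_lt_of_le (Nat.lt_two_pow_self) (by
        calc 2 ^ q ≤ 2 ^ (q + 1) := Nat.pow_le_pow_right (by omega) (by omega)
          _ ≤ 2 * 2 ^ (q + 1) := Nat.le_mul_of_pos_left _ (by omega))
    rw [pvV2Loop_eq (q + 1) q 0 2 (by omega) hfuel]
    have h2 : 2 * (q / 2) - PySem.Int.bitCount ((q / 2 : Nat) : Int) =
        q - PySem.Int.bitCount (q : Int) := by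
      match hq2 : q with
      | 0 => simp
      | m + 1 =>
        have hpe := PySem.Int.bitCount_natCast (show 0 < m + 1 by omega)
        have hle := pvBitCount_le ((m + 1) / 2)
        omega
    rw [Nat.zero_add, h2, hx']
    have := pvBitCount_le q
    omega

-- A's post-hoc renormalisation (t mod MP − v + MP) mod MP equals B's direct (t − v) mod MP
theorem pvEmod_shift (t v : Int) :
    PySem.Int.mod (PySem.Int.mod t (1000003 - 1) - v + (1000003 - 1)) (1000003 - 1) =
    PySem.Int.mod (t - v) (1000003 - 1) := by
  rw [PySem.Int.mod_eq_emod_of_pos (by norm_num), PySem.Int.mod_eq_emod_of_pos (by norm_num),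
      PySem.Int.mod_eq_emod_of_pos (by norm_num)]
  omega

-- once the accumulator is 0, the product loop stays 0
theorem pvFoldZero (l : List Int) (f : Int → Int) :
    l.foldl (fun acc i => PySem.Int.mod (acc * f i) 1000003) 0 = 0 := by
  induction l with
  | nil => rfl
  | cons a l ih =>
    simpa [PySem.Int.mod_eq_emod_of_pos (by norm_num : (0:Int) < 1000003)] using ih

-- A's product loop equals B's short-circuited version, for 0 ≤ D < 1000003
theorem pvAcomp_eq (D k : Int) (hD0 : 0 ≤ D) (hDM : D < 1000003) :
    (PySem.List.pyRange 0 k 1).foldl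
      (fun acc i => PySem.Int.mod (acc * PySem.Int.mod (D - i) 1000003) 1000003) 1 =
    (if D < k then 0
     else (PySem.List.pyRange 0 k 1).foldl
       (fun acc i => PySem.Int.mod (acc * (D - i)) 1000003) 1) := by
  by_cases hDk : D < k
  · -- the factor at i = D is 0, and 0 absorbs
    rw [if_pos hDk,
        PySem.List.pyRange_one_append 0 D k hD0 (le_of_lt hDk),
        PySem.List.pyRange_one_cons hDk, List.foldl_append, List.foldl_cons]
    have hz : PySem.Int.mod (D - D) 1000003 = 0 := by simp
    rw [hz]
    have hmul : ∀ a : Int, PySem.Int.mod (a * 0) 1000003 = 0 := by intro a; simp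
    rw [hmul]
    exact pvFoldZero _ _
  · -- every factor D − i lies in [1, 1000003), so the inner mod is the identity
    rw [if_neg hDk]
    apply PySem.List.foldl_congr_mem
    intro acc i hi
    rw [PySem.List.mem_pyRange_one] at hi
    have : PySem.Int.mod (D - i) 1000003 = D - i := by
      rw [PySem.Int.mod_eq_emod_of_pos (by norm_num)]
      exact Int.emod_eq_of_lt (by omega) (by omega)
    rw [this]

-- ===== VERDICT (by name: the statement is the Claim_ definition above) =====
theorem solve_spec : Claim_equal_solve := by
  intro n k _hdom hpre
  unfold Spec_solve solve solve_alt
  by_cases hg : n < 60 ∧ (1 : Int) <<< n.toNat < k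
  · simp only [if_pos hg]
  · simp only [if_neg hg]
    rw [pvV2Factorial_eq]
    show (_ , _) = (_, _)
    set V : Int := if k - 1 < 0 then 0 else k - 1 - (PySem.Int.bitCount (k - 1) : Int) with hV
    rw [pvEmod_shift]
    by_cases hk : k < 1000003
    · simp only [if_pos hk]
      rw [pvAcomp_eq _ k (PySem.Int.powMod_nonneg 2 _ (by norm_num))
            (PySem.Int.powMod_lt 2 _ (by norm_num))]
    · simp only [if_neg hk]
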